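-- pv_equiv track=rewrite | github.com/jasond1016/just-say | python/text_processing.py | trim_stable_prefix
-- ===== SOURCE A (Python) =====
-- def is_loose_word_char(ch: str) -> bool:
--     return ch.isalnum() or "\u3040" <= ch <= "\u30ff" or "\u31f0" <= ch <= "\u31ff" or "\u3400" <= ch <= "\u9fff"
--
-- def trim_stable_prefix(text: str, keep_tail_meaningful_chars: int) -> str:
--     normalized = (text or "").strip()
--     if not normalized:
--         return ""
--
--     if keep_tail_meaningful_chars <= 0:
--         return normalized
--
--     remaining = keep_tail_meaningful_chars
--     index = len(normalized)
--     while index > 0 and remaining > 0: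
--         index -= 1
--         if is_loose_word_char(normalized[index]):
--             remaining -= 1
--
--     if remaining > 0:
--         return ""
--     return normalized[:index].rstrip()
-- ===== SOURCE B (Python) =====
-- def is_loose_word_char(ch: str) -> bool:
--     return ch.isalnum() or "\u3040" <= ch <= "\u30ff" or "\u31f0" <= ch <= "\u31ff" or "\u3400" <= ch <= "\u9fff"
--
-- def trim_stable_prefix(text: str, keep_tail_meaningful_chars: int) -> str:
--     normalized = (text or "").strip()
--     if not normalized:
--         return ""
--     if keep_tail_meaningful_chars <= 0:
--         return normalized
--     word_indices = [i for i, ch in enumerate(normalized) if is_loose_word_char(ch)]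
--     if len(word_indices) < keep_tail_meaningful_chars:
--         return ""
--     cut = word_indices[len(word_indices) - keep_tail_meaningful_chars]
--     return normalized[:cut].rstrip()
-- ===== Notes on version B (the rewrite author's own statement) =====
-- stated objective: alternative
-- what changed: Replaces the backward counting while-loop over character positions with a forward-built list of meaningful-character indices and a direct arithmetic lookup of the cut position.
import Mathlib
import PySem

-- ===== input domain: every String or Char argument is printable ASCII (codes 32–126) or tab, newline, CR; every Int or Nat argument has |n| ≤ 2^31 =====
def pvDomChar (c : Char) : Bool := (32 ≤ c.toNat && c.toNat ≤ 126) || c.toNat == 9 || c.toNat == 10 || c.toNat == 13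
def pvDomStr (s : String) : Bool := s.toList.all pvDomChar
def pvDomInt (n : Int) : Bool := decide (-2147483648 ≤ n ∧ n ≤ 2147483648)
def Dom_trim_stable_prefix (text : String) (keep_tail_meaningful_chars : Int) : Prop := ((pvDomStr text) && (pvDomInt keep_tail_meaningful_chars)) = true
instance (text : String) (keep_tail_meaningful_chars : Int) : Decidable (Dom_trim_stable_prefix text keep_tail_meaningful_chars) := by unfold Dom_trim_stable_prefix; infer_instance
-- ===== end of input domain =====

-- B replaces A's backward counting walk with a forward-built index list of the meaningful
-- characters and a direct arithmetic lookup of the cut position (alternative, same cost).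


-- ===== PORT A =====
-- shared module helper is_loose_word_char; the Unicode-range tests are Python single-char
-- string comparisons, i.e. code-point comparisons (exact)
def isLooseWordChar (c : Char) : Bool :=
  PySem.Chars.isalnum c || (0x3040 ≤ c.toNat && c.toNat ≤ 0x30ff)
    || (0x31f0 ≤ c.toNat && c.toNat ≤ 0x31ff) || (0x3400 ≤ c.toNat && c.toNat ≤ 0x9fff)

-- A's while loop: state (index, remaining); reads normalized[index] after 'index -= 1'
def trimLoop (cs : List Char) : Nat → Int → Nat × Int
  | 0, r => (0, r)
  | i + 1, r =>
      if 0 < r then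
        trimLoop cs i (r - (if isLooseWordChar (PySem.List.pyGetD cs (i : Int) ' ') then 1 else 0))
      else (i + 1, r)

-- '(text or "")' equals 'text' here: both are '""' when text is the empty string
def trim_stable_prefix (text : String) (keep_tail_meaningful_chars : Int) : String :=
  let normalized := PySem.Chars.strip text.toList
  if normalized = [] then ""
  else if keep_tail_meaningful_chars ≤ 0 then String.ofList normalized
  else
    let p := trimLoop normalized normalized.length keep_tail_meaningful_chars
    if 0 < p.2 then ""
    else String.ofList (PySem.Chars.rstrip (PySem.List.slice normalized none (some (p.1 : Int))))

-- ===== PORT B =====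
def trim_stable_prefix_alt (text : String) (keep_tail_meaningful_chars : Int) : String :=
  let normalized := PySem.Chars.strip text.toList
  if normalized = [] then ""
  else if keep_tail_meaningful_chars ≤ 0 then String.ofList normalized
  else
    let wi := ((PySem.List.enumerate normalized).filter (fun p => isLooseWordChar p.2)).map Prod.fst
    if (wi.length : Int) < keep_tail_meaningful_chars then ""
    else
      let cut := PySem.List.pyGetD wi ((wi.length : Int) - keep_tail_meaningful_chars) 0
      String.ofList (PySem.Chars.rstrip (PySem.List.slice normalized none (some cut)))

-- ===== PRECONDITION & SPEC =====
def Spec_trim_stable_prefix (text : String) (keep_tail_meaningful_chars : Int) (out : String) : Prop := out = trim_stable_prefix_alt text keep_tail_meaningful_chars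
instance (text : String) (keep_tail_meaningful_chars : Int) (out : String) : Decidable (Spec_trim_stable_prefix text keep_tail_meaningful_chars out) := by unfold Spec_trim_stable_prefix; infer_instance

-- ===== CLAIM (what is proved, stated in full; the proofs are below) =====
def Claim_equal_trim_stable_prefix : Prop := ∀ (text : String) (keep_tail_meaningful_chars : Int), Dom_trim_stable_prefix text keep_tail_meaningful_chars → Spec_trim_stable_prefix text keep_tail_meaningful_chars (trim_stable_prefix text keep_tail_meaningful_chars)

-- ===== LEMMAS AND PROOFS =====

-- proof-side model of B's index list, with Nat indices
def widx : List Char → Nat → List Nat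
  | [], _ => []
  | c :: t, i => if isLooseWordChar c then i :: widx t (i + 1) else widx t (i + 1)

theorem widx_enumerate (cs : List Char) (s : Nat) :
    ((PySem.List.enumerate cs (s : Int)).filter (fun p => isLooseWordChar p.2)).map Prod.fst
      = (widx cs s).map (Nat.cast : Nat → Int) := by
  induction cs generalizing s with
  | nil => simp [PySem.List.enumerate, widx]
  | cons c t ih =>
    have h1 : (s : Int) + 1 = ((s + 1 : Nat) : Int) := by push_cast; ring
    simp only [PySem.List.enumerate, widx]
    by_cases h : isLooseWordChar c <;> simp [h, List.filter] <;> rw [h1] <;> exact ih (s+1)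

theorem widx_append (xs ys : List Char) (s : Nat) :
    widx (xs ++ ys) s = widx xs s ++ widx ys (s + xs.length) := by
  induction xs generalizing s with
  | nil => simp [widx]
  | cons c t ih =>
    simp only [List.cons_append, widx, ih, List.length_cons]
    by_cases h : isLooseWordChar c <;> simp [h] <;> ring_nf

theorem trimLoop_nonpos (cs : List Char) (i : Nat) (r : Int) (h : r ≤ 0) :
    trimLoop cs i r = (i, r) := by
  cases i <;> simp [trimLoop] <;> omega

-- characterisation of A's loop: with r ≥ 1 left to find, it lands on the r-th-from-last
-- meaningful index of the first i characters, or runs out with r minus their count left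
theorem trimLoop_widx (cs : List Char) (i : Nat) (hi : i ≤ cs.length) (r : Int) (hr : 1 ≤ r) :
    trimLoop cs i r =
      if r ≤ ((widx (cs.take i) 0).length : Int) then
        ((widx (cs.take i) 0).getD ((widx (cs.take i) 0).length - r.toNat) 0, 0)
      else (0, r - ((widx (cs.take i) 0).length : Int)) := by
  induction i generalizing r with
  | zero => simp [trimLoop, widx]; omega
  | succ i ih =>
    have hi' : i ≤ cs.length := by omega
    have hlt : i < cs.length := by omega
    have htake : cs.take (i + 1) = cs.take i ++ [cs[i]] := by
      rw [List.take_add_one]; simp [List.getElem?_eq_getElem hlt]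
    have hlen : (cs.take i).length = i := by simp [hi']
    have hget : PySem.List.pyGetD cs (i : Int) ' ' = cs[i] := by
      simp [PySem.List.pyGetD_natCast, List.getD, List.getElem?_eq_getElem hlt]
    have hstep : trimLoop cs (i+1) r
        = trimLoop cs i (r - (if isLooseWordChar cs[i] then 1 else 0)) := by
      rw [← hget]; simp only [trimLoop, if_pos (by omega : (0:Int) < r)]
    set W := widx (cs.take i) 0 with hWdef
    have hW : widx (cs.take (i+1)) 0 = W ++ widx [cs[i]] i := by
      rw [htake, widx_append, hlen, Nat.zero_add, ← hWdef]
    by_cases hc : isLooseWordChar cs[i]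
    · have hW' : widx (cs.take (i+1)) 0 = W ++ [i] := by
        rw [hW]; simp [widx, hc]
      rw [hstep, if_pos hc, hW']
      by_cases hr1 : r = 1
      · subst hr1
        rw [trimLoop_nonpos cs i (1-1) (by omega)]
        rw [if_pos (by simp)]
        have h1 : (W ++ [i]).length - (1:Int).toNat = W.length := by simp
        rw [h1, List.getD_append_right W [i] _ _ (le_refl _)]
        simp
      · have hr2 : 1 ≤ r - 1 := by omega
        rw [ih hi' (r-1) hr2]
        by_cases hle : r - 1 ≤ (W.length : Int)
        · rw [if_pos hle, if_pos (by simp; omega)]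
          have hidxlt : (W ++ [i]).length - r.toNat < W.length := by simp; omega
          rw [List.getD_append _ _ _ _ hidxlt]
          have hidx : (W ++ [i]).length - r.toNat = W.length - (r-1).toNat := by simp; omega
          rw [hidx]
        · rw [if_neg hle, if_neg (by simp; omega)]
          simp only [Prod.mk.injEq, List.length_append, List.length_cons, List.length_nil]
          push_cast
          exact ⟨trivial, by omega⟩
    · have hW' : widx (cs.take (i+1)) 0 = W := by
        rw [hW]; simp [widx, hc]
      rw [hstep, if_neg hc, hW']
      simpa using ih hi' r hr

-- ===== VERDICT (by name: the statement is the Claim_ definition above) =====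
theorem trim_stable_prefix_spec : Claim_equal_trim_stable_prefix := by
  unfold Claim_equal_trim_stable_prefix Spec_trim_stable_prefix
  intro text k _
  unfold trim_stable_prefix trim_stable_prefix_alt
  set cs := PySem.Chars.strip text.toList with hcs
  by_cases h0 : cs = []
  · simp [h0]
  by_cases hk : k ≤ 0
  · simp [h0, hk]
  simp only [if_neg h0, if_neg hk]
  have hk1 : 1 ≤ k := by omega
  have hwi : ((PySem.List.enumerate cs).filter (fun p => isLooseWordChar p.2)).map Prod.fst
      = (widx cs 0).map (Nat.cast : Nat → Int) := by
    have h := widx_enumerate cs 0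
    simpa using h
  rw [hwi, trimLoop_widx cs cs.length (le_refl _) k hk1, List.take_length]
  set W := widx cs 0 with hWdef
  rw [List.length_map]
  by_cases hle : k ≤ (W.length : Int)
  · rw [if_pos hle]
    rw [if_neg (by omega : ¬ ((W.length : Int)) < k), if_neg (by omega : ¬ (0:Int) < 0)]
    have hn : W.length - k.toNat < W.length := by omega
    have hcast : ((W.length : Int) - k) = ((W.length - k.toNat : Nat) : Int) := by omega
    rw [hcast, PySem.List.pyGetD_natCast]
    have hgd : (W.map (Nat.cast : Nat → Int)).getD (W.length - k.toNat) 0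
        = ((W.getD (W.length - k.toNat) 0 : Nat) : Int) := by
      simp [List.getD, List.getElem?_map]
      cases h : W[W.length - k.toNat]? <;> simp
    rw [hgd]
  · rw [if_neg hle]
    rw [if_pos (by omega : ((W.length : Int)) < k), if_pos (by omega : (0:Int) < k - (W.length : Int))]
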